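-- pv_equiv track=rewrite | github.com/Donovan0243/DrugRecRAG | src/retrieval.py | _filter_kg_facts_by_keywords
-- ===== SOURCE A (Python) =====
-- from typing import List, Tuple, Dict
--
-- def _filter_kg_facts_by_keywords(facts: List[str], keywords: List[str]) -> List[str]:
--     """根据关键词过滤KG事实。
--
--     中文说明：从KG事实列表中，筛选出包含指定关键词的事实。
--     这是GAP"定向审查"（Targeted Review）的核心实现：只返回与关键风险点相关的信息。
--
--     Args:
--         facts: KG事实列表（文本格式）
--         keywords: 关键词列表（用于过滤）
--
--     Returns:
--         过滤后的KG事实列表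
--     """
--     if not facts or not keywords:
--         return facts
--
--     filtered = []
--     facts_lower = [f.lower() for f in facts]
--     keywords_lower = [k.lower() for k in keywords]
--
--     for fact, fact_lower in zip(facts, facts_lower):
--         # 检查是否包含任何关键词
--         if any(kw in fact_lower for kw in keywords_lower):
--             filtered.append(fact)
--
--     return filtered
-- ===== SOURCE B (Python) =====
-- from typing import List
--
-- def _filter_kg_facts_by_keywords(facts: List[str], keywords: List[str]) -> List[str]:
--     # B: prune the keyword list first (dedup + drop any keyword that contains an
--     # already-kept keyword as a substring), then filter facts against the pruned set.
--     if not keywords: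
--         return facts
--     minimal: List[str] = []
--     for kw in keywords:
--         k = kw.lower()
--         if not any(m in k for m in minimal):
--             minimal.append(k)
--     return [f for f in facts if any(k in f.lower() for k in minimal)]
-- ===== Notes on version B (the rewrite author's own statement) =====
-- stated objective: alternative
-- what changed: B first prunes the keyword list (dedup and drop keywords containing an already-kept keyword as substring, justified by substring transitivity) and then filters facts with a single comprehension over the pruned set, instead of A's zip over pre-lowered facts testing the full keyword list.
import Mathlib
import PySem

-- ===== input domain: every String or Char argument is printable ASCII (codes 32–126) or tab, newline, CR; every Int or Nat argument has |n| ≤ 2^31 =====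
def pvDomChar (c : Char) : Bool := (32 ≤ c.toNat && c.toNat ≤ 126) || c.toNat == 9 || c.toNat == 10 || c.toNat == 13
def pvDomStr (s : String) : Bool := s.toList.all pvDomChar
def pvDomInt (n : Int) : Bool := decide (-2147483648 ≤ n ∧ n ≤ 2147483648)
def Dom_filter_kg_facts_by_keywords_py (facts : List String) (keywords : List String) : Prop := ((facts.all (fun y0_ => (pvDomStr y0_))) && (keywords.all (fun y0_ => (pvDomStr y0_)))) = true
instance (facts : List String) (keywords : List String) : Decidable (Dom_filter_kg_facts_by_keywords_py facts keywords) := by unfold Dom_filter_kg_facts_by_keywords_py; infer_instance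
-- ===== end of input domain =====

-- B prunes the keyword list (dedup + drop keywords containing a kept keyword) before one filtering pass; same return value as A.


-- ===== PORT A =====
def filter_kg_facts_by_keywords_py (facts : List String) (keywords : List String) : List String :=
  if facts = [] ∨ keywords = [] then facts
  else
    let factsLower := facts.map PySem.Str.lower
    let keywordsLower := keywords.map PySem.Str.lower
    (facts.zip factsLower).foldl
      (fun filtered p =>
        if keywordsLower.any (fun kw => PySem.Str.isIn kw p.2) then filtered ++ [p.1] else filtered)
      []

-- ===== PORT B =====
def filter_kg_facts_by_keywords_py_alt (facts : List String) (keywords : List String) : List String :=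
  if keywords = [] then facts
  else
    let minimal := keywords.foldl
      (fun minimal kw =>
        let k := PySem.Str.lower kw
        if minimal.any (fun m => PySem.Str.isIn m k) then minimal else minimal ++ [k])
      []
    facts.filter (fun f => minimal.any (fun k => PySem.Str.isIn k (PySem.Str.lower f)))

-- ===== PRECONDITION & SPEC =====
def Spec_filter_kg_facts_by_keywords_py (facts : List String) (keywords : List String) (out : List String) : Prop := out = filter_kg_facts_by_keywords_py_alt facts keywords
instance (facts : List String) (keywords : List String) (out : List String) : Decidable (Spec_filter_kg_facts_by_keywords_py facts keywords out) := by unfold Spec_filter_kg_facts_by_keywords_py; infer_instance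

-- ===== CLAIM (what is proved, stated in full; the proofs are below) =====
def Claim_equal_filter_kg_facts_by_keywords_py : Prop := ∀ (facts : List String) (keywords : List String), Dom_filter_kg_facts_by_keywords_py facts keywords → Spec_filter_kg_facts_by_keywords_py facts keywords (filter_kg_facts_by_keywords_py facts keywords)

-- ===== LEMMAS AND PROOFS =====

-- substring transitivity for Python's `in`
theorem pv_isIn_trans (a b c : String) (h1 : PySem.Str.isIn a b = true)
    (h2 : PySem.Str.isIn b c = true) : PySem.Str.isIn a c = true := by
  rw [PySem.Str.isIn_iff_infix] at *
  exact h1.trans h2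

-- pruning preserves "some keyword occurs in s"
theorem pv_minimal_any (ks : List String) (acc : List String) (s : String) :
    (ks.foldl
      (fun minimal kw =>
        if minimal.any (fun m => PySem.Str.isIn m (PySem.Str.lower kw)) then minimal
        else minimal ++ [PySem.Str.lower kw])
      acc).any (fun k => PySem.Str.isIn k s)
    = (acc.any (fun k => PySem.Str.isIn k s)
        || ks.any (fun kw => PySem.Str.isIn (PySem.Str.lower kw) s)) := by
  induction ks generalizing acc with
  | nil => simp
  | cons kw ks ih =>
    simp only [List.foldl_cons, List.any_cons]
    by_cases hc : acc.any (fun m => PySem.Str.isIn m (PySem.Str.lower kw)) = true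
    · rw [if_pos hc, ih]
      by_cases hs : PySem.Str.isIn (PySem.Str.lower kw) s = true
      · obtain ⟨m, hm, hmk⟩ := List.any_eq_true.mp hc
        have hacc : acc.any (fun k => PySem.Str.isIn k s) = true :=
          List.any_eq_true.mpr ⟨m, hm, pv_isIn_trans m (PySem.Str.lower kw) s hmk hs⟩
        rw [hacc, hs, Bool.true_or, Bool.true_or]
      · rw [Bool.not_eq_true] at hs
        rw [hs, Bool.false_or]
    · rw [if_neg hc, ih, List.any_append]
      simp only [List.any_cons, List.any_nil, Bool.or_false, Bool.or_assoc]

theorem filter_kg_spec_aux (facts keywords : List String) :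
    filter_kg_facts_by_keywords_py facts keywords
      = filter_kg_facts_by_keywords_py_alt facts keywords := by
  unfold filter_kg_facts_by_keywords_py filter_kg_facts_by_keywords_py_alt
  by_cases hk : keywords = []
  · simp [hk]
  · simp only [hk, or_false, if_false]
    simp only [pv_minimal_any, List.any_nil, Bool.false_or]
    by_cases hf : facts = []
    · simp [hf]
    · simp only [hf, if_false]
      rw [← List.map_prod_left_eq_zip, List.foldl_map,
        PySem.List.foldl_append_if
          (fun f => (keywords.map PySem.Str.lower).any (fun kw => PySem.Str.isIn kw (PySem.Str.lower f)))
          (fun f => f) facts []]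
      simp only [List.nil_append, List.map_id_fun', id, List.any_map, Function.comp_def]

-- ===== VERDICT (by name: the statement is the Claim_ definition above) =====
theorem filter_kg_facts_by_keywords_py_spec : Claim_equal_filter_kg_facts_by_keywords_py := by
  intro facts keywords _
  exact filter_kg_spec_aux facts keywords
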